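-- pv_equiv track=rewrite | github.com/sarahkocsis/advent_of_code_2023 | Day4/day4.py | calc_card_score
-- ===== SOURCE A (Python) =====
-- def calc_card_score(winning_numbers, received_numbers):
--     curr_score = 0
--     curr_quantity_found = 0
--     for num in received_numbers:
--         if num in winning_numbers:
--             curr_quantity_found = curr_quantity_found + 1
--             curr_score = 2 ** (curr_quantity_found - 1)
--     return curr_score, curr_quantity_found
-- ===== SOURCE B (Python) =====
-- def calc_card_score(winning_numbers, received_numbers):
--     # frequency table of received numbers, then sum the multiplicities of the
--     # distinct received values that belong to the winning set; score is the
--     # closed form 2**(count-1) (0 when no match).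
--     freq = {}
--     for num in received_numbers:
--         freq[num] = freq.get(num, 0) + 1
--     wins = set(winning_numbers)
--     count = sum(c for v, c in freq.items() if v in wins)
--     return (2 ** (count - 1) if count else 0, count)
-- ===== Notes on version B (the rewrite author's own statement) =====
-- stated objective: faster
-- what changed: Replaces A's per-element 'num in winning_numbers' list scan and repeatedly overwritten running score with a frequency dictionary of received_numbers plus a winning set, summing the multiplicities of the distinct winning values and computing the score once as the closed form 2**(count-1) (0 when count is 0).
import Mathlib
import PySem

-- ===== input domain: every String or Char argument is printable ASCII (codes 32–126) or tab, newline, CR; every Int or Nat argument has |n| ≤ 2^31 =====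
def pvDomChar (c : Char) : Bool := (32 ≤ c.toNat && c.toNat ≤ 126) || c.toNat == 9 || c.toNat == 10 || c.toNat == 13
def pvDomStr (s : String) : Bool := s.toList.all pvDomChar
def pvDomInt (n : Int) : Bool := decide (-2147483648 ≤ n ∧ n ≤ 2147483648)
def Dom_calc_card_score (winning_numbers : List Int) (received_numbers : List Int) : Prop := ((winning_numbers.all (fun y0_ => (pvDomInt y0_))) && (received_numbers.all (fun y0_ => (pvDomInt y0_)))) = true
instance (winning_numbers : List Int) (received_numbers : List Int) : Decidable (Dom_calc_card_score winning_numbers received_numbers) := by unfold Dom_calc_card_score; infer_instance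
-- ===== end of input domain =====

-- B replaces A's per-element membership scan with a frequency table + winning set
-- and a closed-form score; equivalence of the return value is proved below.

-- ===== PORT A =====
-- literal port of A's loop: state (curr_score, curr_quantity_found)
def calc_card_score (winning_numbers : List Int) (received_numbers : List Int) : Int × Int :=
  received_numbers.foldl
    (fun st num =>
      if winning_numbers.contains num then
        ((2 : Int) ^ (st.2 + 1 - 1).toNat, st.2 + 1)
      else st)
    (0, 0)

-- ===== PORT B =====
-- B: build freq = {num: multiplicity} over received_numbers, wins = set(winning_numbers),
-- count = sum of multiplicities of distinct received values that are winning, closed-form score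
def calc_card_score_alt (winning_numbers : List Int) (received_numbers : List Int) : Int × Int :=
  let freq := received_numbers.foldl
    (fun d num => d.insert num (d.getD num 0 + 1)) (PySem.Dict.empty : PySem.Dict Int Int)
  let wins := PySem.Set.ofList winning_numbers
  let count := ((freq.items.filter (fun p => wins.contains p.1)).foldl
    (fun acc p => acc + p.2) 0 : Int)
  let score : Int := if count = 0 then 0 else 2 ^ (count - 1).toNat
  (score, count)

-- ===== PRECONDITION & SPEC =====
def Spec_calc_card_score (winning_numbers : List Int) (received_numbers : List Int) (out : Int × Int) : Prop := out = calc_card_score_alt winning_numbers received_numbers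
instance (winning_numbers : List Int) (received_numbers : List Int) (out : Int × Int) : Decidable (Spec_calc_card_score winning_numbers received_numbers out) := by unfold Spec_calc_card_score; infer_instance

-- ===== CLAIM (what is proved, stated in full; the proofs are below) =====
def Claim_equal_calc_card_score : Prop := ∀ (winning_numbers : List Int) (received_numbers : List Int), Dom_calc_card_score winning_numbers received_numbers → Spec_calc_card_score winning_numbers received_numbers (calc_card_score winning_numbers received_numbers)

-- ===== LEMMAS AND PROOFS =====

-- A's loop invariant: starting from quantity q with the score A keeps for q
-- matches so far, the fold ends at the count-then-closed-form value
theorem pv_loop_inv (w : List Int) (xs : List Int) (q : Nat) (s : Int)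
    (hs : q ≠ 0 → s = 2 ^ (q - 1)) :
    xs.foldl
      (fun st num =>
        if w.contains num then ((2 : Int) ^ (st.2 + 1 - 1).toNat, st.2 + 1) else st)
      (s, (q : Int)) =
    (if q + xs.countP (fun num => w.contains num) = 0 then s
     else 2 ^ (q + xs.countP (fun num => w.contains num) - 1),
     ((q + xs.countP (fun num => w.contains num) : Nat) : Int)) := by
  induction xs generalizing q s with
  | nil =>
    simp only [List.foldl_nil, List.countP_nil, Nat.add_zero]
    by_cases hq : q = 0
    · simp [hq]
    · rw [if_neg hq, hs hq]
  | cons x xs ih =>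
    by_cases h : w.contains x
    · have hcast : ((q : Int) + 1) = ((q + 1 : Nat) : Int) := by push_cast; ring
      simp only [List.foldl_cons, List.countP_cons, h, if_pos, hcast]
      have hexp : (((q + 1 : Nat) : Int) - 1).toNat = q := by omega
      rw [hexp]
      rw [ih (q + 1) _ (fun _ => by simp)]
      congr 1
      · rw [if_neg (by omega), if_neg (by omega)]
        congr 1
        omega
      · congr 1
        omega
    · simp only [List.foldl_cons, List.countP_cons, h]
      simpa using ih q s hs

-- summing r's multiplicities over the distinct keys of a Nodup list S that satisfy p
-- counts exactly the elements of r that satisfy p and lie in S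
theorem pv_sum_count_filter (p : Int → Bool) (r S : List Int) (hS : S.Nodup) :
    ((S.filter p).map (fun k => (r.count k : Int))).sum
      = (r.countP (fun x => p x && decide (x ∈ S)) : Int) := by
  induction r with
  | nil => simp
  | cons x r ih =>
    have hcount : ∀ k ∈ S.filter p,
        ((x :: r).count k : Int) = (r.count k : Int) + (if k == x then (1:Int) else 0) := by
      intro k _
      rw [List.count_cons]
      by_cases h : k = x
      · simp [h]
      · simp [h]
        exact fun he => h he.symm
    calc ((S.filter p).map (fun k => ((x :: r).count k : Int))).sum
        = ((S.filter p).map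
            (fun k => (r.count k : Int) + (if k == x then (1:Int) else 0))).sum := by
          congr 1
          exact List.map_congr_left hcount
      _ = ((S.filter p).map (fun k => (r.count k : Int))).sum
            + ((S.filter p).map (fun k => (if k == x then (1:Int) else 0))).sum :=
          PySem.List.sum_map_add_int _ _ _
      _ = ((x :: r).countP (fun y => p y && decide (y ∈ S)) : Int) := by
          rw [ih, PySem.List.sum_map_ite_one_zero (fun k => k == x),
              ← List.count_eq_countP, (hS.filter p).count, List.countP_cons]
          simp only [List.mem_filter]
          split_ifs with h1 h2 h2 <;> simp_all

-- the Bool membership tests agree: set(winning) vs the list itself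
theorem pv_contains_ofList (w : List Int) (k : Int) :
    (PySem.Set.ofList w).contains k = w.contains k := by
  simp [PySem.Set.mem_ofList]

-- ===== VERDICT (by name: the statement is the Claim_ definition above) =====
theorem calc_card_score_spec : Claim_equal_calc_card_score := by
  intro w r _
  unfold Spec_calc_card_score calc_card_score calc_card_score_alt
  simp only [PySem.Dict.foldl_insert_getD_add_one_eq_counter, PySem.Dict.items_counter]
  rw [List.filter_map, PySem.List.foldl_add _ (fun p : Int × Int => p.2)]
  simp only [List.map_map, Function.comp_def, zero_add]
  have hfil : (PySem.Set.ofList r).filter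
      (fun k => (PySem.Set.ofList w).contains k)
      = (PySem.Set.ofList r).filter (fun k => w.contains k) := by
    apply List.filter_congr
    intro k _
    rw [pv_contains_ofList]
  rw [hfil, pv_sum_count_filter (fun k => w.contains k) r _ (PySem.Set.nodup_ofList r)]
  have hcongr : r.countP (fun y => w.contains y && decide (y ∈ PySem.Set.ofList r))
      = r.countP (fun num => w.contains num) := by
    apply List.countP_congr
    intro y hy
    simp [PySem.Set.mem_ofList, hy]
  rw [hcongr]
  have hA := pv_loop_inv w r 0 0 (by simp)
  simp only [Nat.cast_zero, Nat.zero_add] at hA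
  rw [hA]
  set c := r.countP (fun num => w.contains num) with hc
  by_cases h0 : c = 0
  · simp [h0]
  · have h0' : ((c : Int)) ≠ 0 := by exact_mod_cast h0
    rw [if_neg h0, if_neg h0']
    congr 1
    congr 1
    omega
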